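-- pv_equiv track=rewrite | github.com/ahmadkaleem123/ESC190Labs | Lab7/lab7.py | dp_energy
-- ===== SOURCE A (Python) =====
-- def dp_energy(energy):
--     h =  len(energy)
--     w = len(energy[0])
--     dp = [0] * h * w
--     for i in range(w):
--         dp[i] = energy[0][i]
--     for j in range(1, h):
--         for x in range(w):
--             dp[j*w + x] =   dp[(j-1)*w + x] + energy[j][x]
--             if(x-1 >= 0):
--                 if(dp[j*w + x] >  dp[(j-1)*w + x-1] + energy[j][x]):
--                     dp[j*w + x] =  dp[(j-1)*w + x-1] + energy[j][x]
--             if(x+1 < w):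
--                 if(dp[j*w + x] >  dp[(j-1)*w + x+1] + energy[j][x]):
--                     dp[j*w + x] =  dp[(j-1)*w + x+1] + energy[j][x]
--     return min(dp[(h-1)*w:])
-- ===== SOURCE B (Python) =====
-- def dp_energy(energy):
--     h = len(energy)
--     w = len(energy[0])
--     memo = {}
--
--     def best(j, x):
--         # min seam cost from row 0 down to cell (j, x)
--         if (j, x) in memo:
--             return memo[(j, x)]
--         if j == 0:
--             v = energy[0][x]
--         else:
--             m = best(j - 1, x)
--             if x > 0:
--                 c = best(j - 1, x - 1)
--                 if c < m:
--                     m = c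
--             if x + 1 < w:
--                 c = best(j - 1, x + 1)
--                 if c < m:
--                     m = c
--             v = energy[j][x] + m
--         memo[(j, x)] = v
--         return v
--
--     return min(best(h - 1, x) for x in range(w))
-- ===== Notes on version B (the rewrite author's own statement) =====
-- stated objective: alternative
-- what changed: B computes the seam cost by top-down memoized recursion best(j, x) (base row 0, recursing on the three upper neighbours, results cached in a dict keyed by (j, x)) instead of A's bottom-up tabulation into a flat h*w array with index arithmetic; what is maintained (a demand-filled memo map vs a flat table) and the traversal (depth-first from the bottom row vs row-major loops) genuinely differ.
import Mathlib
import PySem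

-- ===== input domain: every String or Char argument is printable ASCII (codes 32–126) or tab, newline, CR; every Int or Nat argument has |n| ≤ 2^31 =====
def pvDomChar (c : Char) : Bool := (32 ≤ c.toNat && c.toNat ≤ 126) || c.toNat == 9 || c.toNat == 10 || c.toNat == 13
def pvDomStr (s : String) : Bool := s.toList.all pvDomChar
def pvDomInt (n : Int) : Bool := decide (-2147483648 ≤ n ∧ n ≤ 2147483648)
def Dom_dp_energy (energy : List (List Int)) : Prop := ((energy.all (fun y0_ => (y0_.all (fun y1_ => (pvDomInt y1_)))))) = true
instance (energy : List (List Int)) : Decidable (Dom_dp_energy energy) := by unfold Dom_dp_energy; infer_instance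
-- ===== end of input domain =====

-- B replaces A's bottom-up forward DP over a flat h*w array by top-down memoized recursion
-- best(j, x) (a dict keyed by (j, x)); same asymptotic cost, different decomposition.

-- ===== PORT A =====
-- energy[j][x]; Pre_ guarantees every index either port reads is in range, so getD's default is never hit
def pvGetE (energy : List (List Int)) (j x : Nat) : Int := (energy.getD j []).getD x 0

-- the three statements of A's inner loop body, one cell (j, x) of the flat dp array
def pvBody1 (energy : List (List Int)) (w j : Nat) (dp : List Int) (x : Nat) : List Int :=
  dp.set (j*w + x) (dp.getD ((j-1)*w + x) 0 + pvGetE energy j x)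

def pvBody2 (energy : List (List Int)) (w j : Nat) (dp : List Int) (x : Nat) : List Int :=
  if 1 ≤ x then
    (if dp.getD (j*w + x) 0 > dp.getD ((j-1)*w + (x-1)) 0 + pvGetE energy j x then
      dp.set (j*w + x) (dp.getD ((j-1)*w + (x-1)) 0 + pvGetE energy j x) else dp)
  else dp

def pvBody3 (energy : List (List Int)) (w j : Nat) (dp : List Int) (x : Nat) : List Int :=
  if x + 1 < w then
    (if dp.getD (j*w + x) 0 > dp.getD ((j-1)*w + (x+1)) 0 + pvGetE energy j x then
      dp.set (j*w + x) (dp.getD ((j-1)*w + (x+1)) 0 + pvGetE energy j x) else dp)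
  else dp

def pvBodyA (energy : List (List Int)) (w j : Nat) (dp : List Int) (x : Nat) : List Int :=
  pvBody3 energy w j (pvBody2 energy w j (pvBody1 energy w j dp x) x) x

def dp_energy (energy : List (List Int)) : Int :=
  let h := energy.length
  let w := (energy.getD 0 []).length
  let dp0 := List.replicate (h * w) (0 : Int)
  let dp1 := (List.range w).foldl (fun dp i => dp.set i (pvGetE energy 0 i)) dp0
  let dp2 := (List.range' 1 (h - 1)).foldl
    (fun dp j => (List.range w).foldl (pvBodyA energy w j) dp) dp1
  ((dp2.drop ((h-1)*w)).min?).getD 0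

-- ===== PORT B =====
-- best(j, x) threading the memo dict (keys are the Python int pairs (j, x)); recursion on j
def pvBestB (energy : List (List Int)) (w : Nat) :
    Nat → Nat → PySem.Dict (Int × Int) Int → Int × PySem.Dict (Int × Int) Int
  | j, x, memo =>
    match memo.get? ((j : Int), (x : Int)) with
    | some v => (v, memo)
    | none =>
      match j with
      | 0 =>
        let v := pvGetE energy 0 x
        (v, memo.insert ((0 : Int), (x : Int)) v)
      | j' + 1 =>
        let p1 := pvBestB energy w j' x memo
        let p2 := if 0 < x then
            let c := pvBestB energy w j' (x - 1) p1.2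
            (if c.1 < p1.1 then c.1 else p1.1, c.2)
          else p1
        let p3 := if x + 1 < w then
            let c := pvBestB energy w j' (x + 1) p2.2
            (if c.1 < p2.1 then c.1 else p2.1, c.2)
          else p2
        let v := pvGetE energy (j' + 1) x + p3.1
        (v, p3.2.insert (((j' + 1 : Nat) : Int), (x : Int)) v)

def dp_energy_alt (energy : List (List Int)) : Int :=
  let h := energy.length
  let w := (energy.getD 0 []).length
  let res := (List.range w).foldl
    (fun (acc : List Int × PySem.Dict (Int × Int) Int) x =>
      let p := pvBestB energy w (h - 1) x acc.2
      (acc.1 ++ [p.1], p.2))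
    ([], PySem.Dict.empty)
  ((res.1.min?).getD 0)

-- ===== PRECONDITION & SPEC =====
-- exactly the inputs on which A returns: a nonempty grid, a nonempty first row, and every row
-- at least as long as the first; on all other well-typed inputs both A and B raise
def Pre_dp_energy (energy : List (List Int)) : Prop :=
  energy ≠ [] ∧ 0 < (energy.getD 0 []).length ∧
    ∀ row ∈ energy, (energy.getD 0 []).length ≤ row.length
instance (energy : List (List Int)) : Decidable (Pre_dp_energy energy) := by
  unfold Pre_dp_energy; infer_instance

def pvWitness_dp_energy : List (List Int) := [[1, 2], [3, 4]]

def Spec_dp_energy (energy : List (List Int)) (out : Int) : Prop := out = dp_energy_alt energy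
instance (energy : List (List Int)) (out : Int) : Decidable (Spec_dp_energy energy out) := by
  unfold Spec_dp_energy; infer_instance

-- ===== CLAIM (what is proved, stated in full; the proofs are below) =====
def Claim_equal_dp_energy : Prop := ∀ (energy : List (List Int)),
  Dom_dp_energy energy → Pre_dp_energy energy → Spec_dp_energy energy (dp_energy energy)

-- ===== LEMMAS AND PROOFS =====

-- min over the neighbour columns {x-1, x, x+1} ∩ [0, w) of f
def nmin (w : Nat) (f : Nat → Int) (x : Nat) : Int :=
  if x + 1 < w then
    (if 1 ≤ x then min (min (f x) (f (x - 1))) (f (x + 1)) else min (f x) (f (x + 1)))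
  else (if 1 ≤ x then min (f x) (f (x - 1)) else f x)

-- forward DP value: min seam cost from row 0 down to cell (j, x)
def fF (energy : List (List Int)) (w : Nat) : Nat → Nat → Int
  | 0 => fun x => pvGetE energy 0 x
  | j+1 => fun x => pvGetE energy (j+1) x + nmin w (fF energy w j) x

-- min over x < w of g
def rmin (w : Nat) (g : Nat → Int) : Int := (((List.range w).map g).min?).getD 0

-- getD over set
theorem getD_set_self (l : List Int) (i : Nat) (v : Int) (h : i < l.length) :
    (l.set i v).getD i 0 = v := by
  rw [List.getD_eq_getElem?_getD, List.getElem?_set_self h]; rfl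

theorem getD_set_ne (l : List Int) (i j : Nat) (v : Int) (h : i ≠ j) :
    (l.set i v).getD j 0 = l.getD j 0 := by
  rw [List.getD_eq_getElem?_getD, List.getElem?_set_ne h, ← List.getD_eq_getElem?_getD]

-- ---- A side ----

theorem idx_lt (hN w j' t : Nat) (hj : j' + 1 < hN) (ht : t < w) :
    (j'+1)*w + t < hN*w := by
  calc (j'+1)*w + t < (j'+1)*w + w := by omega
    _ = (j'+2)*w := by ring
    _ ≤ hN*w := Nat.mul_le_mul_right _ (by omega)

theorem prev_ne (w j' k x : Nat) (hk : k < w) : j'*w + k ≠ (j'+1)*w + x := by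
  have : j'*w + k < (j'+1)*w := by
    calc j'*w + k < j'*w + w := by omega
      _ = (j'+1)*w := by ring
  omega

theorem body1_eq (energy : List (List Int)) (w j' x : Nat) (dp : List Int) (hxw : x < w)
    (hprev : ∀ k, k < w → dp.getD (j'*w + k) 0 = fF energy w j' k) :
    pvBody1 energy w (j'+1) dp x
      = dp.set ((j'+1)*w + x) (fF energy w j' x + pvGetE energy (j'+1) x) := by
  unfold pvBody1
  rw [Nat.add_sub_cancel, hprev x hxw]

theorem body2_eq (energy : List (List Int)) (hN w j' x : Nat) (dp : List Int) (v : Int)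
    (hj : j' + 1 < hN) (hxw : x < w) (hlen : dp.length = hN*w)
    (hprev : ∀ k, k < w → dp.getD (j'*w + k) 0 = fF energy w j' k) :
    pvBody2 energy w (j'+1) (dp.set ((j'+1)*w + x) v) x
      = dp.set ((j'+1)*w + x)
          (if 1 ≤ x then min v (fF energy w j' (x-1) + pvGetE energy (j'+1) x) else v) := by
  unfold pvBody2
  rw [Nat.add_sub_cancel]
  by_cases hx1 : 1 ≤ x
  · rw [if_pos hx1, if_pos hx1]
    have ra : (dp.set ((j'+1)*w + x) v).getD ((j'+1)*w + x) 0 = v :=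
      getD_set_self _ _ _ (by rw [hlen]; exact idx_lt hN w j' x hj hxw)
    have rb : (dp.set ((j'+1)*w + x) v).getD (j'*w + (x-1)) 0 = fF energy w j' (x-1) := by
      rw [getD_set_ne _ _ _ _ (Ne.symm (prev_ne w j' (x-1) x (by omega)))]
      exact hprev _ (by omega)
    rw [ra, rb]
    split_ifs with hgt
    · rw [List.set_set, min_eq_right (le_of_lt hgt)]
    · rw [min_eq_left (by omega)]
  · rw [if_neg hx1, if_neg hx1]

theorem body3_eq (energy : List (List Int)) (hN w j' x : Nat) (dp : List Int) (v : Int)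
    (hj : j' + 1 < hN) (hxw : x < w) (hlen : dp.length = hN*w)
    (hprev : ∀ k, k < w → dp.getD (j'*w + k) 0 = fF energy w j' k) :
    pvBody3 energy w (j'+1) (dp.set ((j'+1)*w + x) v) x
      = dp.set ((j'+1)*w + x)
          (if x + 1 < w then min v (fF energy w j' (x+1) + pvGetE energy (j'+1) x) else v) := by
  unfold pvBody3
  rw [Nat.add_sub_cancel]
  by_cases hx1 : x + 1 < w
  · rw [if_pos hx1, if_pos hx1]
    have ra : (dp.set ((j'+1)*w + x) v).getD ((j'+1)*w + x) 0 = v :=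
      getD_set_self _ _ _ (by rw [hlen]; exact idx_lt hN w j' x hj hxw)
    have rb : (dp.set ((j'+1)*w + x) v).getD (j'*w + (x+1)) 0 = fF energy w j' (x+1) := by
      rw [getD_set_ne _ _ _ _ (Ne.symm (prev_ne w j' (x+1) x hx1))]
      exact hprev _ hx1
    rw [ra, rb]
    split_ifs with hgt
    · rw [List.set_set, min_eq_right (le_of_lt hgt)]
    · rw [min_eq_left (by omega)]
  · rw [if_neg hx1, if_neg hx1]

theorem bodyA_eq (energy : List (List Int)) (hN w j' x : Nat) (dp : List Int)
    (hj : j' + 1 < hN) (hxw : x < w) (hlen : dp.length = hN*w)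
    (hprev : ∀ k, k < w → dp.getD (j'*w + k) 0 = fF energy w j' k) :
    pvBodyA energy w (j'+1) dp x = dp.set ((j'+1)*w + x) (fF energy w (j'+1) x) := by
  unfold pvBodyA
  rw [body1_eq energy w j' x dp hxw hprev,
      body2_eq energy hN w j' x dp _ hj hxw hlen hprev,
      body3_eq energy hN w j' x dp _ hj hxw hlen hprev]
  congr 1
  show _ = fF energy w (j'+1) x
  simp only [fF]
  unfold nmin
  split_ifs with hb ha ha
  · rw [min_add_add_right, min_add_add_right]; ring
  · rw [min_add_add_right]; ring
  · rw [min_add_add_right]; ring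
  · ring

theorem innerA (energy : List (List Int)) (hN w j' : Nat) (hj : j' + 1 < hN)
    (dp : List Int) (hlen : dp.length = hN*w)
    (hprev : ∀ k, k < w → dp.getD (j'*w + k) 0 = fF energy w j' k) :
    ∀ t, t ≤ w →
      ((List.range t).foldl (pvBodyA energy w (j'+1)) dp).length = hN*w ∧
      (∀ k, k < w →
        ((List.range t).foldl (pvBodyA energy w (j'+1)) dp).getD (j'*w + k) 0
          = fF energy w j' k) ∧
      (∀ k, k < t →
        ((List.range t).foldl (pvBodyA energy w (j'+1)) dp).getD ((j'+1)*w + k) 0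
          = fF energy w (j'+1) k) := by
  intro t
  induction t with
  | zero => exact fun _ => ⟨hlen, hprev, fun k hk => absurd hk (by omega)⟩
  | succ t ih =>
    intro htw
    obtain ⟨l1, p1, c1⟩ := ih (by omega)
    rw [List.range_succ, List.foldl_append]
    simp only [List.foldl_cons, List.foldl_nil]
    rw [bodyA_eq energy hN w j' t _ hj (by omega) l1 p1]
    refine ⟨by rw [List.length_set, l1], ?_, ?_⟩
    · intro k hk
      rw [getD_set_ne _ _ _ _ (Ne.symm (prev_ne w j' k t hk))]
      exact p1 k hk
    · intro k hk
      by_cases hkt : k = t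
      · subst hkt
        exact getD_set_self _ _ _ (by rw [l1]; exact idx_lt hN w j' k hj (by omega))
      · rw [getD_set_ne _ _ _ _ (by omega)]
        exact c1 k (by omega)

theorem initA (energy : List (List Int)) (hN w : Nat) (hh : 0 < hN) :
    ∀ t, t ≤ w →
      ((List.range t).foldl (fun dp i => dp.set i (pvGetE energy 0 i))
          (List.replicate (hN*w) (0:Int))).length = hN*w ∧
      (∀ k, k < t →
        ((List.range t).foldl (fun dp i => dp.set i (pvGetE energy 0 i))
            (List.replicate (hN*w) (0:Int))).getD k 0 = fF energy w 0 k) := by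
  intro t
  induction t with
  | zero => exact fun _ => ⟨by simp, fun k hk => absurd hk (by omega)⟩
  | succ t ih =>
    intro htw
    obtain ⟨l1, c1⟩ := ih (by omega)
    rw [List.range_succ, List.foldl_append]
    simp only [List.foldl_cons, List.foldl_nil]
    have hw' : w ≤ hN*w := Nat.le_mul_of_pos_left w hh
    refine ⟨by rw [List.length_set, l1], ?_⟩
    intro k hk
    by_cases hkt : k = t
    · subst hkt
      rw [getD_set_self _ _ _ (by rw [l1]; omega)]
      simp [fF]
    · rw [getD_set_ne _ _ _ _ (by omega)]
      exact c1 k (by omega)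

theorem outerA (energy : List (List Int)) (hN w : Nat) :
    ∀ m, m < hN → ∀ dp : List Int, dp.length = hN*w →
      (∀ k, k < w → dp.getD k 0 = fF energy w 0 k) →
      ((List.range' 1 m).foldl
          (fun dp j => (List.range w).foldl (pvBodyA energy w j) dp) dp).length = hN*w ∧
      (∀ k, k < w →
        ((List.range' 1 m).foldl
            (fun dp j => (List.range w).foldl (pvBodyA energy w j) dp) dp).getD (m*w + k) 0
          = fF energy w m k) := by
  intro m
  induction m with
  | zero =>
    intro _ dp hlen hbase
    refine ⟨by simpa using hlen, ?_⟩
    intro k hk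
    simpa [Nat.zero_mul] using hbase k hk
  | succ m ih =>
    intro hm dp hlen hbase
    obtain ⟨l1, c1⟩ := ih (by omega) dp hlen hbase
    rw [List.range'_concat]
    have h1m : 1 + 1*m = m + 1 := by omega
    rw [h1m, List.foldl_append]
    simp only [List.foldl_cons, List.foldl_nil]
    obtain ⟨l2, _, c2⟩ := innerA energy hN w m hm _ l1
      (fun k hk => c1 k hk) w le_rfl
    exact ⟨l2, fun k hk => c2 k hk⟩

theorem A_eq (energy : List (List Int)) (hPre : Pre_dp_energy energy) :
    dp_energy energy
      = rmin (energy.getD 0 []).length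
          (fF energy (energy.getD 0 []).length (energy.length - 1)) := by
  obtain ⟨hne, hw, -⟩ := hPre
  have hh : 0 < energy.length := List.length_pos_of_ne_nil hne
  simp only [dp_energy]
  obtain ⟨l1, i1⟩ := initA energy energy.length (energy.getD 0 []).length hh
    (energy.getD 0 []).length le_rfl
  obtain ⟨l2, i2⟩ := outerA energy energy.length (energy.getD 0 []).length
    (energy.length - 1) (by omega) _ l1 (fun k hk => i1 k hk)
  have hsplit : energy.length * (energy.getD 0 []).length
      = (energy.length - 1) * (energy.getD 0 []).length + (energy.getD 0 []).length := by
    cases energy with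
    | nil => simp at hh
    | cons a l => simp [Nat.succ_mul]
  have hlenL :
      (((List.range' 1 (energy.length - 1)).foldl
          (fun dp j => (List.range (energy.getD 0 []).length).foldl
            (pvBodyA energy (energy.getD 0 []).length j) dp)
          ((List.range (energy.getD 0 []).length).foldl
            (fun dp i => dp.set i (pvGetE energy 0 i))
            (List.replicate (energy.length * (energy.getD 0 []).length) (0:Int)))).drop
        ((energy.length - 1) * (energy.getD 0 []).length)).length
        = (energy.getD 0 []).length := by
    rw [List.length_drop, l2]; omega
  have hL :
      ((List.range' 1 (energy.length - 1)).foldl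
          (fun dp j => (List.range (energy.getD 0 []).length).foldl
            (pvBodyA energy (energy.getD 0 []).length j) dp)
          ((List.range (energy.getD 0 []).length).foldl
            (fun dp i => dp.set i (pvGetE energy 0 i))
            (List.replicate (energy.length * (energy.getD 0 []).length) (0:Int)))).drop
        ((energy.length - 1) * (energy.getD 0 []).length)
      = (List.range (energy.getD 0 []).length).map
          (fF energy (energy.getD 0 []).length (energy.length - 1)) := by
    apply List.ext_getElem (by rw [hlenL, List.length_map, List.length_range])
    intro i h1 h2
    have hi : i < (energy.getD 0 []).length := by rwa [hlenL] at h1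
    rw [List.getElem_drop]
    have h3 := i2 i hi
    rw [List.getD_eq_getElem _ _ (by rw [l2]; omega)] at h3
    rw [h3]
    simp
  rw [hL]
  rfl

-- ---- B side: the memo invariant ----

-- every value stored in the memo is the DP value of its key
def GoodMemo (energy : List (List Int)) (w : Nat)
    (memo : PySem.Dict (Int × Int) Int) : Prop :=
  ∀ p v, memo.get? p = some v →
    ∃ jn xn : Nat, p = ((jn : Int), (xn : Int)) ∧ v = fF energy w jn xn

theorem goodMemo_empty (energy : List (List Int)) (w : Nat) :
    GoodMemo energy w PySem.Dict.empty := by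
  intro p v h
  rw [PySem.Dict.get?_empty] at h
  exact absurd h (by simp)

theorem goodMemo_insert (energy : List (List Int)) (w : Nat)
    (memo : PySem.Dict (Int × Int) Int) (j x : Nat) (v : Int)
    (hg : GoodMemo energy w memo) (hv : v = fF energy w j x) :
    GoodMemo energy w (memo.insert ((j : Int), (x : Int)) v) := by
  intro p u h
  rw [PySem.Dict.get?_insert] at h
  by_cases hp : p = ((j : Int), (x : Int))
  · rw [if_pos hp] at h
    exact ⟨j, x, hp, by rw [← Option.some_inj.mp h, hv]⟩
  · rw [if_neg hp] at h
    exact hg p u h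

theorem bestB_spec (energy : List (List Int)) (w : Nat) :
    ∀ j x memo, GoodMemo energy w memo →
      (pvBestB energy w j x memo).1 = fF energy w j x ∧
      GoodMemo energy w (pvBestB energy w j x memo).2 := by
  intro j
  induction j with
  | zero =>
    intro x memo hg
    rw [pvBestB.eq_def]
    dsimp only
    cases hget : memo.get? (((0 : Nat) : Int), ((x : Nat) : Int)) with
    | some v =>
      obtain ⟨jn, xn, hp, hv⟩ := hg _ v hget
      have h1 : jn = 0 := by have h := congrArg Prod.fst hp; simp at h; omega
      have h2 : xn = x := by have h := congrArg Prod.snd hp; simp at h; omega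
      dsimp only
      exact ⟨by rw [hv, h1, h2], hg⟩
    | none =>
      dsimp only
      exact ⟨rfl, goodMemo_insert energy w memo 0 x _ hg rfl⟩
  | succ j' ih =>
    intro x memo hg
    rw [pvBestB.eq_def]
    dsimp only
    cases hget : memo.get? (((j' + 1 : Nat) : Int), ((x : Nat) : Int)) with
    | some v =>
      obtain ⟨jn, xn, hp, hv⟩ := hg _ v hget
      have h1 : jn = j' + 1 := by have h := congrArg Prod.fst hp; simp at h; omega
      have h2 : xn = x := by have h := congrArg Prod.snd hp; simp at h; omega
      dsimp only
      exact ⟨by rw [hv, h1, h2], hg⟩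
    | none =>
      dsimp only
      obtain ⟨e1, g1⟩ := ih x memo hg
      by_cases hx0 : 0 < x
      · obtain ⟨e2, g2⟩ := ih (x - 1) _ g1
        by_cases hxw : x + 1 < w
        · obtain ⟨e3, g3⟩ := ih (x + 1) _ g2
          simp only [if_pos hx0, if_pos hxw, e1, e2, e3]
          refine ⟨?_, goodMemo_insert energy w _ (j' + 1) x _ g3 ?_⟩ <;>
            (simp only [fF]; congr 1; unfold nmin;
             rw [if_pos hxw, if_pos (show 1 ≤ x by omega)];
             simp only [min_def]; split_ifs <;> omega)
        · simp only [if_pos hx0, if_neg hxw, e1, e2]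
          refine ⟨?_, goodMemo_insert energy w _ (j' + 1) x _ g2 ?_⟩ <;>
            (simp only [fF]; congr 1; unfold nmin;
             rw [if_neg hxw, if_pos (show 1 ≤ x by omega)];
             simp only [min_def]; split_ifs <;> omega)
      · by_cases hxw : x + 1 < w
        · obtain ⟨e3, g3⟩ := ih (x + 1) _ g1
          simp only [if_neg hx0, if_pos hxw, e1, e3]
          refine ⟨?_, goodMemo_insert energy w _ (j' + 1) x _ g3 ?_⟩ <;>
            (simp only [fF]; congr 1; unfold nmin;
             rw [if_pos hxw, if_neg (show ¬ 1 ≤ x by omega)];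
             simp only [min_def]; split_ifs <;> omega)
        · simp only [if_neg hx0, if_neg hxw, e1]
          refine ⟨?_, goodMemo_insert energy w _ (j' + 1) x _ g1 ?_⟩ <;>
            (simp only [fF]; congr 1; unfold nmin;
             rw [if_neg hxw, if_neg (show ¬ 1 ≤ x by omega)])

theorem altB_fold (energy : List (List Int)) (w hm : Nat) :
    ∀ t, ((List.range t).foldl
        (fun (acc : List Int × PySem.Dict (Int × Int) Int) x =>
          let p := pvBestB energy w hm x acc.2
          (acc.1 ++ [p.1], p.2))
        ([], PySem.Dict.empty)).1 = (List.range t).map (fF energy w hm) ∧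
      GoodMemo energy w ((List.range t).foldl
        (fun (acc : List Int × PySem.Dict (Int × Int) Int) x =>
          let p := pvBestB energy w hm x acc.2
          (acc.1 ++ [p.1], p.2))
        ([], PySem.Dict.empty)).2 := by
  intro t
  induction t with
  | zero => exact ⟨rfl, goodMemo_empty energy w⟩
  | succ t ih =>
    obtain ⟨h1, h2⟩ := ih
    rw [List.range_succ, List.foldl_append]
    simp only [List.foldl_cons, List.foldl_nil, List.map_append, List.map_cons, List.map_nil]
    obtain ⟨e, g⟩ := bestB_spec energy w hm t _ h2
    exact ⟨by rw [h1, e], g⟩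

theorem altB (energy : List (List Int)) :
    dp_energy_alt energy
      = rmin (energy.getD 0 []).length
          (fF energy (energy.getD 0 []).length (energy.length - 1)) := by
  simp only [dp_energy_alt]
  rw [(altB_fold energy (energy.getD 0 []).length (energy.length - 1)
    (energy.getD 0 []).length).1]
  rfl

-- ===== VERDICT (by name: the statement is the Claim_ definition above) =====
theorem dp_energy_spec : Claim_equal_dp_energy := by
  intro energy _ hPre
  unfold Spec_dp_energy
  rw [A_eq energy hPre, altB energy]
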